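-- pv_equiv track=rewrite | github.com/SparkJiao/dpo-trajectory-reasoning | data/general.py | process_response_v2
-- ===== SOURCE A (Python) =====
-- def process_response_v2(response: str):
--     lines = response.split("\n")
--     outputs = []
--     for line_id, line in enumerate(lines):
--
--         if line.startswith("Thought ") or line.startswith("Action ") or line.startswith("Observation "):
--             outputs.append({
--                 "text": line,
--                 "type": "text",
--                 "line_id": line_id,
--             })
--         elif not line.strip():
--             outputs.append({
--                 "text": line,
--                 "type": "space",
--                 "line_id": line_id,
--             })
--         else:
--             outputs.append({
--                 "text": line,
--                 "type": "continue",
--                 "line_id": line_id,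
--             })
--
--     compose_outputs = []
--     for item in outputs:
--         if item["type"] == "text":
--             compose_outputs.append((item["line_id"], item["text"]))
--         elif item["type"] == "space":
--             if len(compose_outputs):
--                 tmp = compose_outputs[-1]
--                 new_line_text = "\n".join([tmp[1], item["text"]])
--                 compose_outputs[-1] = (tmp[0], new_line_text)
--         else:
--             if len(compose_outputs):
--                 tmp = compose_outputs[-1]
--                 new_line_text = "\n".join([tmp[1], item["text"]])
--                 compose_outputs[-1] = (item["line_id"], new_line_text)
--             else:
--                 compose_outputs.append((item["line_id"], item["text"]))
--
--     outputs = []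
--     types = []
--     for item in compose_outputs:
--         if item[1].startswith("Thought "):
--             content = item[1][len("Thought "):]
--             content = content.strip()
--             if len(content) >= 5 or item[1].startswith(
--                     "Thought 1:"):  # FIXED: Hack for LogiQA-v2 reward model evaluation, where the responses are not cleaned. @2024/01/18.
--                 outputs.append(item)
--                 types.append("Thought")
--         elif item[1].startswith("Action "):
--             content = item[1][len("Action "):]
--             content = content.strip()
--             if len(content) >= 5:
--                 outputs.append(item)
--                 types.append("Action")
--         elif item[1].startswith("Observation "):
--             content = item[1][len("Observation "):]
--             content = content.strip()
--             if len(content) >= 5: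
--                 outputs.append(item)
--                 types.append("Observation")
--         else:
--             # logger.warning(f"Warning: Unknown line: {item[1]}")
--             if len(item[1]) >= 5:
--                 outputs.append(item)
--                 types.append("Unknown")
--
--     return outputs, types
-- ===== SOURCE B (Python) =====
-- # B: instead of A's classify-then-incrementally-merge-into-last-block passes, find the
-- # block boundaries directly (skip leading blanks, then cut at header lines), build each
-- # block from its slice of lines in one shot, and filter via a prefix table + unzip.
--
-- _HEADERS = ("Thought ", "Action ", "Observation ")
-- _TABLE = (("Thought ", "Thought"), ("Action ", "Action"), ("Observation ", "Observation"))
--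
--
-- def process_response_v2(response: str):
--     lines = response.split("\n")
--     n = len(lines)
--     i = 0
--     while i < n and not lines[i].strip():
--         i += 1
--     blocks = []
--     while i < n:
--         j = i + 1
--         while j < n and not lines[j].startswith(_HEADERS):
--             j += 1
--         lid = [k for k in range(i, j) if lines[k].strip()][-1]
--         blocks.append((lid, "\n".join(lines[i:j])))
--         i = j
--
--     kept = []
--     for lid, text in blocks:
--         m = next(((p, t) for p, t in _TABLE if text.startswith(p)), None)
--         if m is None:
--             if len(text) >= 5:
--                 kept.append(((lid, text), "Unknown"))
--         else:
--             p, ty = m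
--             if len(text[len(p):].strip()) >= 5 or (ty == "Thought" and text.startswith("Thought 1:")):
--                 kept.append(((lid, text), ty))
--     return [b for b, _ in kept], [t for _, t in kept]
-- ===== Notes on version B (the rewrite author's own statement) =====
-- stated objective: alternative
-- what changed: B discards A's classify-then-incrementally-merge-into-last-block pipeline: it finds block boundaries directly (skips leading blank lines, cuts the line list at each 'Thought '/'Action '/'Observation ' header) and builds every block in one shot from its slice, then filters via a prefix table and unzips the kept (block, type) pairs.
import Mathlib
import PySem

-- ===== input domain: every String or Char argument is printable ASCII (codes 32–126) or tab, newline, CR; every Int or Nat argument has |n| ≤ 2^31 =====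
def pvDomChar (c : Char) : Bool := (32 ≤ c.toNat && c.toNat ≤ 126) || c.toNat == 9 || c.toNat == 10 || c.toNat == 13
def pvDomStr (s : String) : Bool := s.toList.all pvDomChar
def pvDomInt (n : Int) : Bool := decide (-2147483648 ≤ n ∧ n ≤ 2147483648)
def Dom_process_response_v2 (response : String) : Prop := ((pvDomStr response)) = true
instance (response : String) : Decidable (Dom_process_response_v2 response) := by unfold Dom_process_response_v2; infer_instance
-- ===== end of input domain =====

-- B replaces A's classify-then-incrementally-merge passes by direct block-boundary
-- detection (skip leading blanks, cut at header lines, build each block from its slice);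
-- objective: simpler.

-- ===== PORT A =====
-- classified item: (text, type, line_id), mirroring A's dict {"text","type","line_id"}
def pvClassifyA (it : Int × String) : String × String × Int :=
  if PySem.Str.startswith it.2 "Thought " || PySem.Str.startswith it.2 "Action "
      || PySem.Str.startswith it.2 "Observation " then (it.2, "text", it.1)
  else if PySem.Str.strip it.2 = "" then (it.2, "space", it.1)
  else (it.2, "continue", it.1)

-- one step of A's compose loop; `if len(compose_outputs):` + `compose_outputs[-1]` ported via getLast? (none ↔ empty)
def pvComposeStepA (acc : List (Int × String)) (item : String × String × Int) : List (Int × String) :=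
  if item.2.1 = "text" then acc ++ [(item.2.2, item.1)]
  else if item.2.1 = "space" then
    match acc.getLast? with
    | some tmp => acc.dropLast ++ [(tmp.1, PySem.Str.join "\n" [tmp.2, item.1])]
    | none => acc
  else
    match acc.getLast? with
    | some tmp => acc.dropLast ++ [(item.2.2, PySem.Str.join "\n" [tmp.2, item.1])]
    | none => acc ++ [(item.2.2, item.1)]

-- one step of A's final filter loop (if/elif chain)
def pvFilterStepA (acc : List (Int × String) × List String) (item : Int × String) :
    List (Int × String) × List String :=
  if PySem.Str.startswith item.2 "Thought " then
    if 5 ≤ PySem.Str.len (PySem.Str.strip (PySem.Str.slice item.2 (some 8) none))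
        ∨ PySem.Str.startswith item.2 "Thought 1:" then
      (acc.1 ++ [item], acc.2 ++ ["Thought"]) else acc
  else if PySem.Str.startswith item.2 "Action " then
    if 5 ≤ PySem.Str.len (PySem.Str.strip (PySem.Str.slice item.2 (some 7) none)) then
      (acc.1 ++ [item], acc.2 ++ ["Action"]) else acc
  else if PySem.Str.startswith item.2 "Observation " then
    if 5 ≤ PySem.Str.len (PySem.Str.strip (PySem.Str.slice item.2 (some 12) none)) then
      (acc.1 ++ [item], acc.2 ++ ["Observation"]) else acc
  else
    if 5 ≤ PySem.Str.len item.2 then (acc.1 ++ [item], acc.2 ++ ["Unknown"]) else acc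

def process_response_v2 (response : String) : (List (Int × String)) × List String :=
  let lines := (PySem.Str.split? response "\n").getD []
  let outputs := (PySem.List.enumerate lines).foldl (fun acc it => acc ++ [pvClassifyA it]) []
  let compose_outputs := outputs.foldl pvComposeStepA []
  compose_outputs.foldl pvFilterStepA ([], [])

-- ===== PORT B =====
def pvIsHeaderB (l : String) : Bool :=
  PySem.Str.startswith l "Thought " || PySem.Str.startswith l "Action "
    || PySem.Str.startswith l "Observation "

def pvIsBlankB (l : String) : Bool := PySem.Str.strip l == ""

-- B's outer while loop over block boundaries: the chunk runs to the next header line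
-- (takeWhile/dropWhile port the inner `while j < n and not startswith` index loop);
-- Python's `[k for k in range(i,j) if lines[k].strip()][-1]` is the pyGetD at -1 (its
-- list is nonempty wherever B reaches it, since a chunk starts at a non-blank line).
def pvBlocksB : List (Int × String) → List (Int × String)
  | [] => []
  | x :: rest =>
    let chunk := x :: rest.takeWhile (fun p => !pvIsHeaderB p.2)
    let lid := PySem.List.pyGetD ((chunk.filter (fun p => !pvIsBlankB p.2)).map Prod.fst) (-1) 0
    (lid, PySem.Str.join "\n" (chunk.map Prod.snd))
      :: pvBlocksB (rest.dropWhile (fun p => !pvIsHeaderB p.2))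
termination_by l => l.length
decreasing_by
  simp only [List.length_cons]
  exact Nat.lt_succ_of_le (List.length_dropWhile_le _ _)

def pvTableB : List (String × String) :=
  [("Thought ", "Thought"), ("Action ", "Action"), ("Observation ", "Observation")]

-- B's `next(((p, t) for p, t in _TABLE if text.startswith(p)), None)`
def pvFirstPrefixB : List (String × String) → String → Option (String × String)
  | [], _ => none
  | (p, t) :: rest, s => if PySem.Str.startswith s p then some (p, t) else pvFirstPrefixB rest s

-- B's filter loop body, appending (block, type) pairs to `kept`
def pvKeptStepB (acc : List ((Int × String) × String)) (it : Int × String) :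
    List ((Int × String) × String) :=
  match pvFirstPrefixB pvTableB it.2 with
  | some (p, ty) =>
    if 5 ≤ PySem.Str.len (PySem.Str.strip (PySem.Str.slice it.2 (some (PySem.Str.len p)) none))
        ∨ (ty = "Thought" ∧ PySem.Str.startswith it.2 "Thought 1:") then
      acc ++ [(it, ty)] else acc
  | none => if 5 ≤ PySem.Str.len it.2 then acc ++ [(it, "Unknown")] else acc

def process_response_v2_alt (response : String) : (List (Int × String)) × List String :=
  let lines := (PySem.Str.split? response "\n").getD []
  -- leading-blank skip (B's first while loop), then the boundary scan
  let blocks := pvBlocksB ((PySem.List.enumerate lines).dropWhile (fun p => pvIsBlankB p.2))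
  let kept := blocks.foldl pvKeptStepB []
  (kept.map Prod.fst, kept.map Prod.snd)

-- ===== PRECONDITION & SPEC =====
def Spec_process_response_v2 (response : String) (out : (List (Int × String)) × List String) : Prop := out = process_response_v2_alt response
instance (response : String) (out : (List (Int × String)) × List String) : Decidable (Spec_process_response_v2 response out) := by unfold Spec_process_response_v2; infer_instance

-- ===== CLAIM (what is proved, stated in full; the proofs are below) =====
def Claim_equal_process_response_v2 : Prop := ∀ (response : String), Dom_process_response_v2 response → Spec_process_response_v2 response (process_response_v2 response)

-- ===== LEMMAS AND PROOFS =====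

-- A's classify+compose loop over a list of (line_id, line) pairs, as one fold
def pvG (acc : List (Int × String)) (l : List (Int × String)) : List (Int × String) :=
  l.foldl (fun a x => pvComposeStepA a (pvClassifyA x)) acc

theorem pv_strip_ne_nil (s : List Char) (c : Char) (hc : c ∈ s)
    (hs : PySem.Chars.isspace c = false) : PySem.Chars.strip s ≠ [] := by
  intro h
  have hdef : PySem.Chars.strip s
      = ((s.dropWhile PySem.Chars.isspace).reverse.dropWhile PySem.Chars.isspace).reverse := rfl
  rw [hdef, List.reverse_eq_nil_iff, List.dropWhile_eq_nil_iff] at h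
  have hc2 : c ∈ s.dropWhile PySem.Chars.isspace := by
    have hsplit := List.takeWhile_append_dropWhile (p := PySem.Chars.isspace) (l := s)
    rw [← hsplit] at hc
    rcases List.mem_append.mp hc with h' | h'
    · have := List.mem_takeWhile_imp h'
      rw [hs] at this; exact absurd this (by simp)
    · exact h'
  have := h c (List.mem_reverse.mpr hc2)
  rw [hs] at this; exact absurd this (by simp)

-- a header line is never blank ('Thought'/'Action'/'Observation' survives strip)
theorem pv_header_not_blank (l : String) (h : pvIsHeaderB l = true) : pvIsBlankB l = false := by
  have hne : PySem.Chars.strip l.toList ≠ [] := by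
    unfold pvIsHeaderB at h
    simp only [PySem.Str.startswith_eq, Bool.or_eq_true] at h
    rcases h with (h | h) | h
    · obtain ⟨t, ht⟩ := (PySem.Chars.startswith_iff _ _).mp h
      refine pv_strip_ne_nil _ 'T' ?_ (by decide)
      rw [← ht]; simp
    · obtain ⟨t, ht⟩ := (PySem.Chars.startswith_iff _ _).mp h
      refine pv_strip_ne_nil _ 'A' ?_ (by decide)
      rw [← ht]; simp
    · obtain ⟨t, ht⟩ := (PySem.Chars.startswith_iff _ _).mp h
      refine pv_strip_ne_nil _ 'O' ?_ (by decide)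
      rw [← ht]; simp
  unfold pvIsBlankB
  rw [beq_eq_false_iff_ne]
  intro he
  apply hne
  rw [← PySem.Str.toList_strip, he]
  rfl

theorem pv_classify_header (x : Int × String) (h : pvIsHeaderB x.2 = true) :
    pvClassifyA x = (x.2, "text", x.1) := by
  unfold pvIsHeaderB at h
  simp only [pvClassifyA, h]
  simp

theorem pv_classify_blank (x : Int × String) (hh : pvIsHeaderB x.2 = false)
    (hb : pvIsBlankB x.2 = true) : pvClassifyA x = (x.2, "space", x.1) := by
  unfold pvIsHeaderB at hh
  unfold pvIsBlankB at hb
  rw [beq_iff_eq] at hb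
  simp only [pvClassifyA, hh, hb]
  simp

theorem pv_classify_cont (x : Int × String) (hh : pvIsHeaderB x.2 = false)
    (hb : pvIsBlankB x.2 = false) : pvClassifyA x = (x.2, "continue", x.1) := by
  unfold pvIsHeaderB at hh
  unfold pvIsBlankB at hb
  rw [beq_eq_false_iff_ne] at hb
  simp only [pvClassifyA, hh, hb]
  simp [hb]

theorem pv_stepA_ne_nil (acc : List (Int × String)) (y : String × String × Int)
    (h : acc ≠ []) : pvComposeStepA acc y ≠ [] := by
  rcases List.eq_nil_or_concat acc with rfl | ⟨as, a, rfl⟩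
  · exact absurd rfl h
  · simp only [List.concat_eq_append, pvComposeStepA]
    split_ifs <;> simp [List.getLast?_concat, List.dropLast_concat]

theorem pv_stepA_append (done acc : List (Int × String)) (y : String × String × Int)
    (h : acc ≠ []) : pvComposeStepA (done ++ acc) y = done ++ pvComposeStepA acc y := by
  rcases List.eq_nil_or_concat acc with rfl | ⟨as, a, rfl⟩
  · exact absurd rfl h
  · simp only [List.concat_eq_append, pvComposeStepA, ← List.append_assoc]
    split_ifs <;> simp [List.getLast?_concat, List.dropLast_concat]

theorem pvG_append_invariant (l : List (Int × String)) :
    ∀ (done acc : List (Int × String)), acc ≠ [] →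
    pvG (done ++ acc) l = done ++ pvG acc l := by
  induction l with
  | nil => intro done acc _; simp [pvG]
  | cons y t ih =>
    intro done acc h
    simp only [pvG, List.foldl_cons]
    rw [pv_stepA_append done acc _ h]
    exact ih done _ (pv_stepA_ne_nil acc _ h)

theorem pv_join_fold (cont : List (Int × String)) : ∀ (txt : String),
    cont.foldl (fun t p => PySem.Str.join "\n" [t, p.2]) txt
      = PySem.Str.join "\n" (txt :: cont.map Prod.snd) := by
  induction cont with
  | nil =>
    intro txt
    apply String.toList_inj.mp
    simp [PySem.Str.toList_join, PySem.Chars.join_singleton]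
  | cons p t ih =>
    intro txt
    simp only [List.foldl_cons]
    rw [ih]
    apply String.toList_inj.mp
    cases t with
    | nil =>
      simp [PySem.Str.toList_join, PySem.Chars.join_cons_cons, PySem.Chars.join_singleton]
    | cons q qs =>
      simp [PySem.Str.toList_join, PySem.Chars.join_cons_cons, PySem.Chars.join_singleton,
        List.append_assoc]

theorem pvG_chunk (cont : List (Int × String)) : ∀ (lid : Int) (txt : String),
    (∀ p ∈ cont, pvIsHeaderB p.2 = false) →
    pvG [(lid, txt)] cont
      = [((((cont.filter (fun p => !pvIsBlankB p.2)).map Prod.fst).getLast?.getD lid,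
           cont.foldl (fun t p => PySem.Str.join "\n" [t, p.2]) txt))] := by
  induction cont with
  | nil => intro lid txt _; simp [pvG]
  | cons p t ih =>
    intro lid txt hall
    have hph : pvIsHeaderB p.2 = false := hall p (List.mem_cons_self)
    have htail : ∀ q ∈ t, pvIsHeaderB q.2 = false := fun q hq => hall q (List.mem_cons_of_mem _ hq)
    simp only [pvG, List.foldl_cons]
    cases hb : pvIsBlankB p.2 with
    | true =>
      rw [pv_classify_blank p hph hb]
      have hstep : pvComposeStepA [(lid, txt)] (p.2, "space", p.1)
          = [(lid, PySem.Str.join "\n" [txt, p.2])] := by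
        simp [pvComposeStepA]
      rw [hstep]
      have := ih lid (PySem.Str.join "\n" [txt, p.2]) htail
      unfold pvG at this
      rw [this]
      simp [List.filter_cons, hb]
    | false =>
      rw [pv_classify_cont p hph hb]
      have hstep : pvComposeStepA [(lid, txt)] (p.2, "continue", p.1)
          = [(p.1, PySem.Str.join "\n" [txt, p.2])] := by
        simp [pvComposeStepA]
      rw [hstep]
      have := ih p.1 (PySem.Str.join "\n" [txt, p.2]) htail
      unfold pvG at this
      rw [this]
      simp [List.filter_cons, hb, List.getLast?_cons]

theorem pvG_blocks (l : List (Int × String)) :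
    pvG [] l = pvBlocksB (l.dropWhile (fun p => pvIsBlankB p.2)) := by
  induction hn : l.length using Nat.strong_induction_on generalizing l with
  | _ n ih =>
  cases l with
  | nil => simp [pvG, pvBlocksB]
  | cons x t =>
    cases hb : pvIsBlankB x.2 with
    | true =>
      have hh : pvIsHeaderB x.2 = false := by
        cases hh' : pvIsHeaderB x.2
        · rfl
        · rw [pv_header_not_blank _ hh'] at hb; exact hb.symm
      have hfirst : pvG [] (x :: t) = pvG [] t := by
        simp only [pvG, List.foldl_cons]
        rw [pv_classify_blank x hh hb]
        have : pvComposeStepA [] (x.2, "space", x.1) = [] := by simp [pvComposeStepA]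
        rw [this]
      rw [hfirst, List.dropWhile_cons, hb, if_pos rfl]
      exact ih t.length (by simp [← hn]) t rfl
    | false =>
      rw [List.dropWhile_cons, hb]
      simp only [Bool.false_eq_true, if_false]
      have hfirst : pvG [] (x :: t) = pvG [(x.1, x.2)] t := by
        simp only [pvG, List.foldl_cons]
        cases hh : pvIsHeaderB x.2 with
        | true => rw [pv_classify_header x hh]; simp [pvComposeStepA]
        | false => rw [pv_classify_cont x hh hb]; simp [pvComposeStepA]
      rw [hfirst]
      have hsplit := List.takeWhile_append_dropWhile (p := fun p => !pvIsHeaderB p.2) (l := t)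
      have hallcont : ∀ p ∈ t.takeWhile (fun p => !pvIsHeaderB p.2), pvIsHeaderB p.2 = false := by
        intro p hp
        have := List.mem_takeWhile_imp hp
        simpa using this
      have hGsplit : pvG [(x.1, x.2)] t
          = pvG (pvG [(x.1, x.2)] (t.takeWhile (fun p => !pvIsHeaderB p.2)))
              (t.dropWhile (fun p => !pvIsHeaderB p.2)) := by
        conv_lhs => rw [← hsplit]
        simp only [pvG]
        rw [List.foldl_append]
      rw [hGsplit, pvG_chunk _ x.1 x.2 hallcont, pv_join_fold]
      -- unfold one step of pvBlocksB
      rw [pvBlocksB]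
      -- identify the two line_ids
      have hlid : PySem.List.pyGetD
            (((x :: t.takeWhile (fun p => !pvIsHeaderB p.2)).filter (fun p => !pvIsBlankB p.2)).map
              Prod.fst) (-1) 0
          = (((t.takeWhile (fun p => !pvIsHeaderB p.2)).filter
              (fun p => !pvIsBlankB p.2)).map Prod.fst).getLast?.getD x.1 := by
        rw [List.filter_cons, if_pos (by rw [hb]; rfl), List.map_cons]
        rw [PySem.List.pyGetD_neg_one _ _ (by simp)]
        have h1 := List.getLast?_cons (l := ((t.takeWhile (fun p => !pvIsHeaderB p.2)).filter
          (fun p => !pvIsBlankB p.2)).map Prod.fst) (a := x.1)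
        have h2 := List.getLast?_eq_getLast (l := x.1 :: ((t.takeWhile
          (fun p => !pvIsHeaderB p.2)).filter (fun p => !pvIsBlankB p.2)).map Prod.fst) (by simp)
        rw [h1] at h2
        exact (Option.some_inj.mp h2).symm
      rw [hlid]
      -- remaining: pvG [block] rest2 = block :: pvBlocksB rest2
      cases hr : t.dropWhile (fun p => !pvIsHeaderB p.2) with
      | nil => simp [pvG, pvBlocksB]
      | cons y t2 =>
        have hyh : pvIsHeaderB y.2 = true := by
          have h0 := List.head?_dropWhile_not (fun p => !pvIsHeaderB p.2) t
          rw [hr] at h0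
          simpa using h0
        have hyb : pvIsBlankB y.2 = false := pv_header_not_blank _ hyh
        have hGy : ∀ blk : Int × String, pvG [blk] (y :: t2) = blk :: pvG [(y.1, y.2)] t2 := by
          intro blk
          simp only [pvG, List.foldl_cons]
          rw [pv_classify_header y hyh]
          have : pvComposeStepA [blk] (y.2, "text", y.1) = [blk] ++ [(y.1, y.2)] := by
            simp [pvComposeStepA]
          rw [this]
          have := pvG_append_invariant t2 [blk] [(y.1, y.2)] (by simp)
          unfold pvG at this
          rw [this]
          rfl
        rw [hGy]
        have hlen : (y :: t2).length < n := by
          have h1 : (t.dropWhile (fun p => !pvIsHeaderB p.2)).length ≤ t.length :=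
            List.length_dropWhile_le _ _
          rw [hr] at h1
          have hn' : t.length + 1 = n := by simpa using hn
          simp only [List.length_cons] at h1 ⊢
          omega
        have hrec := ih (y :: t2).length hlen (y :: t2) rfl
        have hGy0 : pvG [] (y :: t2) = pvG [(y.1, y.2)] t2 := by
          simp only [pvG, List.foldl_cons]
          rw [pv_classify_header y hyh]
          simp [pvComposeStepA]
        rw [hGy0] at hrec
        rw [hrec, List.dropWhile_cons, hyb]
        simp

set_option maxHeartbeats 1600000 in
theorem pv_filter_step_eq (ka : List ((Int × String) × String)) (it : Int × String) :
    pvFilterStepA (ka.map Prod.fst, ka.map Prod.snd) it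
      = ((pvKeptStepB ka it).map Prod.fst, (pvKeptStepB ka it).map Prod.snd) := by
  have e1 : PySem.Str.len "Thought " = 8 := by decide
  have e2 : PySem.Str.len "Action " = 7 := by decide
  have e3 : PySem.Str.len "Observation " = 12 := by decide
  unfold pvFilterStepA pvKeptStepB
  simp only [pvTableB, pvFirstPrefixB]
  by_cases h1 : PySem.Str.startswith it.2 "Thought " = true <;>
  by_cases h2 : PySem.Str.startswith it.2 "Action " = true <;>
  by_cases h3 : PySem.Str.startswith it.2 "Observation " = true <;>
    simp only [h1, h2, h3, if_true, if_false, Bool.false_eq_true, e1, e2, e3] <;>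
    split_ifs <;> simp_all <;> omega

theorem pv_filter_fold (C : List (Int × String)) :
    ∀ (ka : List ((Int × String) × String)),
    C.foldl pvFilterStepA (ka.map Prod.fst, ka.map Prod.snd)
      = ((C.foldl pvKeptStepB ka).map Prod.fst, (C.foldl pvKeptStepB ka).map Prod.snd) := by
  induction C with
  | nil => intro ka; simp
  | cons c t ih =>
    intro ka
    simp only [List.foldl_cons, pv_filter_step_eq]
    exact ih (pvKeptStepB ka c)

-- ===== VERDICT (by name: the statement is the Claim_ definition above) =====
theorem process_response_v2_spec : Claim_equal_process_response_v2 := by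
  intro response _
  unfold Spec_process_response_v2 process_response_v2 process_response_v2_alt
  dsimp only
  rw [PySem.List.foldl_append_singleton_eq_map, List.nil_append, List.foldl_map]
  have h1 : (PySem.List.enumerate ((PySem.Str.split? response "\n").getD [])).foldl
      (fun a x => pvComposeStepA a (pvClassifyA x)) []
      = pvBlocksB ((PySem.List.enumerate ((PySem.Str.split? response "\n").getD [])).dropWhile
          (fun p => pvIsBlankB p.2)) := pvG_blocks _
  rw [h1]
  have h2 := pv_filter_fold (pvBlocksB ((PySem.List.enumerate ((PySem.Str.split? response "\n").getD [])).dropWhile (fun p => pvIsBlankB p.2))) []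
  simpa using h2
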